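-- pv_equiv track=rewrite | github.com/shihwesley/shihwesleys-harness | scripts/phase-runner.py | extract_changed_files
-- ===== SOURCE A (Python) =====
-- def extract_changed_files(specs):
--     """Extract file paths from spec file tables."""
--     files = {"create": [], "modify": []}
--     for spec in specs:
--         in_table = False
--         for line in spec["content"].split("\n"):
--             if "| File " in line and "| Action " in line:
--                 in_table = True
--                 continue
--             if in_table and line.startswith("|"):
--                 cols = [c.strip() for c in line.split("|")[1:-1]]
--                 if len(cols) >= 2 and cols[0] != "---":
--                     action = cols[1].lower() if len(cols) > 1 else ""
--                     if "create" in action: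
--                         files["create"].append(cols[0])
--                     elif "modify" in action:
--                         files["modify"].append(cols[0])
--             elif in_table and not line.startswith("|"):
--                 in_table = False
--     return files
-- ===== SOURCE B (Python) =====
-- def _is_header(line):
--     return "| File " in line and "| Action " in line
--
--
-- def _table_rows(lines):
--     """Collect the data-row lines of every table block (staged pass 1)."""
--     rows = []
--     i, n = 0, len(lines)
--     while i < n:
--         if _is_header(lines[i]):
--             i += 1
--             while i < n and (lines[i].startswith("|") or _is_header(lines[i])):
--                 if not _is_header(lines[i]):
--                     rows.append(lines[i])
--                 i += 1
--         else:
--             i += 1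
--     return rows
--
--
-- def extract_changed_files(specs):
--     """Extract file paths from spec file tables (staged pipeline:
--     gather table rows, parse them, then filter per action)."""
--     rows = []
--     for spec in specs:
--         rows += _table_rows(spec["content"].split("\n"))
--     parsed = []
--     for row in rows:
--         cols = [c.strip() for c in row.split("|")[1:-1]]
--         if len(cols) >= 2 and cols[0] != "---":
--             parsed.append((cols[0], cols[1].lower()))
--     return {"create": [f for f, a in parsed if "create" in a],
--             "modify": [f for f, a in parsed if "create" not in a and "modify" in a]}
-- ===== Notes on version B (the rewrite author's own statement) =====
-- stated objective: alternative
-- what changed: Replaces A's single-pass in_table state machine that appends into the result dict with a staged pipeline: first collect all table data rows (index-based block parsing), then parse each row to (file, action), then build the create/modify lists by two filters; same linear cost, different structure.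
-- outside the precondition, e.g. on extract_changed_files([{'title': 'x'}]): A raises KeyError, B raises KeyError
import Mathlib
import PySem

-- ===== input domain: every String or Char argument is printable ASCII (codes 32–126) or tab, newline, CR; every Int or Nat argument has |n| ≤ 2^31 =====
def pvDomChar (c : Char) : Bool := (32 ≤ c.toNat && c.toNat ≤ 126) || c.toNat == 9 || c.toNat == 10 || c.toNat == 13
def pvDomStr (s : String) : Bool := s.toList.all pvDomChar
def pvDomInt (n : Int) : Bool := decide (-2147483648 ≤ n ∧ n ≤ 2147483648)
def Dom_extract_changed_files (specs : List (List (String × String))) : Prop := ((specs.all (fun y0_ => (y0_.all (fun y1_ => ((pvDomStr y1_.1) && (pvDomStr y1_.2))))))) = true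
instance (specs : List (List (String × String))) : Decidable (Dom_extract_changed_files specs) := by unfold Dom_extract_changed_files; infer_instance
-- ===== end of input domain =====

-- B replaces A's single-pass in_table flag machine by a staged pipeline:
-- gather all table data rows, parse each to (file, action), then build the
-- two output lists by filtering; same cost, different decomposition.

-- ===== PORT A =====
-- row handling of A's 'if in_table and line.startswith("|")' body
def pvRowA (line : String) (cm : List String × List String) : List String × List String :=
  let cols := (PySem.List.slice ((PySem.Str.split? line "|").getD []) (some 1) (some (-1))).map PySem.Str.strip
  match cols with
  | c0 :: c1 :: _ =>                                    -- len(cols) >= 2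
    if c0 != "---" then
      let action := PySem.Str.lower c1                  -- the ternary's len(cols) > 1 branch always taken here
      if PySem.Str.isIn "create" action then (cm.1 ++ [c0], cm.2)
      else if PySem.Str.isIn "modify" action then (cm.1, cm.2 ++ [c0])
      else cm
    else cm
  | _ => cm

-- one line of A's inner loop; state = (in_table, (create, modify))
def pvStepA (st : Bool × (List String × List String)) (line : String) :
    Bool × (List String × List String) :=
  if PySem.Str.isIn "| File " line && PySem.Str.isIn "| Action " line then (true, st.2)
  else if st.1 && PySem.Str.startswith line "|" then (true, pvRowA line st.2)
  else if st.1 && !(PySem.Str.startswith line "|") then (false, st.2)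
  else st

def extract_changed_files (specs : List (List (String × String))) : List (String × List String) :=
  let files := specs.foldl (fun acc spec =>
    -- spec["content"]: KeyError (no "content" key) is excluded by Pre_; getD "" is never the taken branch there
    (((PySem.Str.split? (((PySem.Dict.mk spec).get? "content").getD "") "\n").getD []).foldl
        pvStepA (false, acc)).2) (([] : List String), ([] : List String))
  [("create", files.1), ("modify", files.2)]

-- ===== PORT B =====
def pvHeaderB (line : String) : Bool :=
  PySem.Str.isIn "| File " line && PySem.Str.isIn "| Action " line

mutual
-- Source B _table_rows, outer while: advance until a header line
def pvScanB : List String → List String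
  | [] => []
  | l :: ls => if pvHeaderB l then pvConsumeB ls else pvScanB ls
-- Source B _table_rows, inner while: collect the block's data rows (headers skipped);
-- the stopping line is neither '|'-prefixed nor a header, so the outer loop's one
-- step on it (not a header → advance) is inlined: the else branch scans on from ls
def pvConsumeB : List String → List String
  | [] => []
  | l :: ls =>
    if PySem.Str.startswith l "|" || pvHeaderB l then
      if pvHeaderB l then pvConsumeB ls else l :: pvConsumeB ls
    else pvScanB ls
end

-- Source B's row parse: cols[0] and cols[1].lower() when len(cols) >= 2 and cols[0] != '---'
def pvParseB (row : String) : Option (String × String) :=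
  let cols := (PySem.List.slice ((PySem.Str.split? row "|").getD []) (some 1) (some (-1))).map PySem.Str.strip
  match cols with
  | c0 :: c1 :: _ => if c0 != "---" then some (c0, PySem.Str.lower c1) else none
  | _ => none

def extract_changed_files_alt (specs : List (List (String × String))) : List (String × List String) :=
  let rows := specs.flatMap (fun spec =>
    pvScanB ((PySem.Str.split? (((PySem.Dict.mk spec).get? "content").getD "") "\n").getD []))
  let parsed := rows.filterMap pvParseB
  [("create", (parsed.filter (fun p => PySem.Str.isIn "create" p.2)).map Prod.fst),
   ("modify", (parsed.filter (fun p => !PySem.Str.isIn "create" p.2 && PySem.Str.isIn "modify" p.2)).map Prod.fst)]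

-- ===== PRECONDITION & SPEC =====
-- Pre_ excludes exactly the specs lacking a "content" key, where Python A raises KeyError.
def Pre_extract_changed_files (specs : List (List (String × String))) : Prop :=
  ∀ spec ∈ specs, (((PySem.Dict.mk spec).get? "content").isSome = true)
instance (specs : List (List (String × String))) : Decidable (Pre_extract_changed_files specs) := by
  unfold Pre_extract_changed_files; infer_instance
def pvWitness_extract_changed_files : (List (List (String × String))) :=
  [[("content", "| File | Action |\n| a.py | create |")]]
def Spec_extract_changed_files (specs : List (List (String × String))) (out : List (String × List String)) : Prop := out = extract_changed_files_alt specs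
instance (specs : List (List (String × String))) (out : List (String × List String)) : Decidable (Spec_extract_changed_files specs out) := by unfold Spec_extract_changed_files; infer_instance

-- ===== CLAIM (what is proved, stated in full; the proofs are below) =====
def Claim_equal_extract_changed_files : Prop := ∀ (specs : List (List (String × String))), Dom_extract_changed_files specs → Pre_extract_changed_files specs → Spec_extract_changed_files specs (extract_changed_files specs)

-- ===== LEMMAS AND PROOFS =====
-- the (create, modify) pair B's pipeline extracts from a row list
def pvCM (rows : List String) : List String × List String :=
  let parsed := rows.filterMap pvParseB
  ((parsed.filter (fun p => PySem.Str.isIn "create" p.2)).map Prod.fst,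
   (parsed.filter (fun p => !PySem.Str.isIn "create" p.2 && PySem.Str.isIn "modify" p.2)).map Prod.fst)

theorem pvCM_append (r1 r2 : List String) :
    pvCM (r1 ++ r2) = ((pvCM r1).1 ++ (pvCM r2).1, (pvCM r1).2 ++ (pvCM r2).2) := by
  simp [pvCM]

-- A's row step equals prepending the parsed row to B's pipeline output
theorem pvRow_cm (l : String) (cm : List String × List String) (rows : List String) :
    ((pvRowA l cm).1 ++ (pvCM rows).1, (pvRowA l cm).2 ++ (pvCM rows).2)
      = (cm.1 ++ (pvCM (l :: rows)).1, cm.2 ++ (pvCM (l :: rows)).2) := by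
  simp only [pvRowA, pvCM, List.filterMap_cons, pvParseB]
  generalize (List.map PySem.Str.strip
      (PySem.List.slice ((PySem.Str.split? l "|").getD []) (some 1) (some (-1)))) = cols
  match cols with
  | [] => simp
  | [c0] => simp
  | c0 :: c1 :: t =>
    by_cases h0 : (c0 != "---") = true
    · simp only [h0, if_true]
      by_cases hc : PySem.Chars.isIn ['c','r','e','a','t','e'] (PySem.Chars.lower c1.toList) = true <;>
        by_cases hm : PySem.Chars.isIn ['m','o','d','i','f','y'] (PySem.Chars.lower c1.toList) = true <;>
          simp [PySem.Str.isIn, PySem.Str.lower, hc, hm]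
    · simp [h0]

theorem pvKey (ls : List String) :
    ∀ cm : List String × List String,
      (ls.foldl pvStepA (false, cm)).2
        = (cm.1 ++ (pvCM (pvScanB ls)).1, cm.2 ++ (pvCM (pvScanB ls)).2) ∧
      (ls.foldl pvStepA (true, cm)).2
        = (cm.1 ++ (pvCM (pvConsumeB ls)).1, cm.2 ++ (pvCM (pvConsumeB ls)).2) := by
  induction ls with
  | nil => intro cm; simp [pvScanB, pvConsumeB, pvCM]
  | cons l ls ih =>
    intro cm
    by_cases hh : pvHeaderB l = true
    · have hh' : (PySem.Str.isIn "| File " l && PySem.Str.isIn "| Action " l) = true := hh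
      constructor <;>
        simp only [List.foldl_cons, pvStepA, hh', if_true, pvScanB, pvConsumeB, hh,
          Bool.or_true, (ih cm).2]
    · have hh' : (PySem.Str.isIn "| File " l && PySem.Str.isIn "| Action " l) = false :=
        by simpa [pvHeaderB] using hh
      have hhf : pvHeaderB l = false := by simpa [pvHeaderB] using hh
      by_cases hs : PySem.Str.startswith l "|" = true
      · refine ⟨?_, ?_⟩
        · simp only [List.foldl_cons, pvStepA, hh', Bool.false_eq_true, if_false,
            Bool.false_and, pvScanB, hhf, (ih cm).1]
        · have := (ih (pvRowA l cm)).2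
          simp only [List.foldl_cons, pvStepA, hh', Bool.false_eq_true, if_false,
            Bool.true_and, hs, if_true, pvConsumeB, hhf, Bool.or_false, this]
          have h2 := pvRow_cm l cm (pvConsumeB ls)
          rw [Prod.ext_iff] at h2
          exact Prod.ext h2.1 h2.2
      · have hs' : PySem.Str.startswith l "|" = false := by simpa using hs
        refine ⟨?_, ?_⟩
        · simp only [List.foldl_cons, pvStepA, hh', Bool.false_eq_true, if_false,
            Bool.false_and, pvScanB, hhf, (ih cm).1]
        · simp only [List.foldl_cons, pvStepA, hh', Bool.false_eq_true, if_false,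
            Bool.true_and, hs', Bool.not_false, if_true, pvConsumeB, hhf, Bool.or_self,
            (ih cm).1]

theorem pvFolds (specs : List (List (String × String))) :
    ∀ acc : List String × List String,
      specs.foldl (fun acc spec =>
        (((PySem.Str.split? (((PySem.Dict.mk spec).get? "content").getD "") "\n").getD []).foldl
            pvStepA (false, acc)).2) acc
      = (acc.1 ++ (pvCM (specs.flatMap (fun spec =>
            pvScanB ((PySem.Str.split? (((PySem.Dict.mk spec).get? "content").getD "") "\n").getD [])))).1,
         acc.2 ++ (pvCM (specs.flatMap (fun spec =>
            pvScanB ((PySem.Str.split? (((PySem.Dict.mk spec).get? "content").getD "") "\n").getD [])))).2) := by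
  induction specs with
  | nil => intro acc; simp [pvCM]
  | cons s ss ih =>
    intro acc
    simp only [List.foldl_cons, List.flatMap_cons]
    rw [(pvKey _ acc).1, ih, pvCM_append]
    simp [List.append_assoc]

-- ===== VERDICT (by name: the statement is the Claim_ definition above) =====
theorem extract_changed_files_spec : Claim_equal_extract_changed_files := by
  intro specs _ _
  unfold Spec_extract_changed_files extract_changed_files extract_changed_files_alt
  rw [pvFolds]
  simp [pvCM]
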